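-- pv_equiv track=rewrite | github.com/mentoredtestbed/wtestbed-minicurso-2025 | scripts/ml-analysis/add_labels.py | get_registry_pairs
-- ===== SOURCE A (Python) =====
-- def get_registry_pairs(registries):
--     reg_names = [r["action_name"] for r in registries]
--     pairs = []
--     for i, reg1 in enumerate(registries):
--         # if reg1["action_name"].startswith("end-"):
--         if reg1["action_name"].startswith("attack-stop"):
--             continue
--
--         reg_name = reg1["action_name"]
--         label_name = reg_name.split("attack-")[-1]
--         target_reg = None
--         for j, reg2 in enumerate(registries):
--             reg2_name = reg2["action_name"]
--             # if i != j and (reg_name in reg2_name) and reg2_name.startswith("stop-"):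
--             if i != j and (label_name in reg2_name) and reg2_name.startswith("attack-stop"):
--                 target_reg = reg2
--                 break
--
--         pairs.append((reg1, target_reg))
--
--     return pairs
-- ===== SOURCE B (Python) =====
-- def get_registry_pairs(registries):
--     # Inverted loops: iterate over the stop registries in order, assigning each one
--     # (first-match-wins) to the still-unassigned non-stop registries it matches.
--     kept = [r for r in registries if not r["action_name"].startswith("attack-stop")]
--     targets = [None] * len(kept)
--     for s in registries:
--         sname = s["action_name"]
--         if sname.startswith("attack-stop"):
--             for i, r in enumerate(kept):
--                 if targets[i] is None and r["action_name"].split("attack-")[-1] in sname: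
--                     targets[i] = s
--     return list(zip(kept, targets))
-- ===== Notes on version B (the rewrite author's own statement) =====
-- stated objective: alternative
-- what changed: B inverts the loop nesting: instead of A's per-registry inner rescan of the whole enumerated list, B filters the non-stop registries once, then iterates over the stop registries in order, assigning each to every still-unassigned non-stop registry it matches (first-match-wins), and finally zips registries with their targets.
import Mathlib
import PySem

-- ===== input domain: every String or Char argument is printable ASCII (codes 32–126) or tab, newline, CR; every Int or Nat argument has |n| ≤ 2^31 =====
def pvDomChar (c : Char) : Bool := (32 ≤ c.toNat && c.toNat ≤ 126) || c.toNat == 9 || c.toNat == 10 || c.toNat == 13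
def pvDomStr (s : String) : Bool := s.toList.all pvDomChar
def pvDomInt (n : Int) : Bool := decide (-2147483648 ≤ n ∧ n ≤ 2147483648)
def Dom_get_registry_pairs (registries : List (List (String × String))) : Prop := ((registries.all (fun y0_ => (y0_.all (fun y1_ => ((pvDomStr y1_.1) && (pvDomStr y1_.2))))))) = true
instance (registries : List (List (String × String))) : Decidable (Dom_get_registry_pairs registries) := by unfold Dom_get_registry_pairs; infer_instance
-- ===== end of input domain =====

-- B inverts the loop nesting: it filters the non-stop registries once, then walks the stop
-- registries in order, assigning each (first-match-wins) to the still-unassigned non-stop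
-- registries it matches, and zips at the end — instead of A's per-registry inner rescan
-- of the whole enumerated list (objective: alternative, same asymptotic cost).

-- r["action_name"] (valid under Pre_, where the key is present)
def pvName (r : List (String × String)) : String :=
  ((PySem.Dict.mk r).get? "action_name").getD ""

-- name.split("attack-")[-1]  (split? is some: the separator is nonempty, so [-1] is the last piece)
def pvLabel (name : String) : String :=
  ((PySem.Str.split? name "attack-").getD [name]).getLastD name

-- ===== PORT A =====
-- inner 'for j, reg2 in enumerate(registries): … break' loop
def pvInnerA (i : Int) (label : String) :
    List (Int × List (String × String)) → Option (List (String × String))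
  | [] => none
  | (j, reg2) :: rest =>
    let reg2_name := pvName reg2
    if i != j && PySem.Str.isIn label reg2_name &&
        PySem.Str.startswith reg2_name "attack-stop" then some reg2
    else pvInnerA i label rest

def get_registry_pairs (registries : List (List (String × String))) :
    List ((List (String × String)) × (Option (List (String × String)))) :=
  let _reg_names := registries.map pvName   -- A computes (and never uses) this list
  (PySem.List.enumerate registries).foldl (fun pairs p =>
    if PySem.Str.startswith (pvName p.2) "attack-stop" then pairs
    else
      let label_name := pvLabel (pvName p.2)
      let target_reg := pvInnerA p.1 label_name (PySem.List.enumerate registries)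
      pairs ++ [(p.2, target_reg)]) []

-- ===== PORT B =====
-- one step of B's outer loop body over a stop registry s: update every still-unassigned slot
def get_registry_pairs_alt (registries : List (List (String × String))) :
    List ((List (String × String)) × (Option (List (String × String)))) :=
  let kept := registries.filter (fun r => !PySem.Str.startswith (pvName r) "attack-stop")
  let targets := registries.foldl (fun ts s =>
      if PySem.Str.startswith (pvName s) "attack-stop" then
        (kept.zip ts).map (fun p =>
          if p.2.isNone && PySem.Str.isIn (pvLabel (pvName p.1)) (pvName s) then some s else p.2)
      else ts)
    (kept.map (fun _ => (none : Option (List (String × String)))))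
  kept.zip targets

-- ===== PRECONDITION & SPEC =====
-- Pre_ excludes registries missing the "action_name" key, on which Python A raises KeyError.
def Pre_get_registry_pairs (registries : List (List (String × String))) : Prop :=
  (registries.all (fun r => (PySem.Dict.mk r).contains "action_name")) = true
instance (registries : List (List (String × String))) : Decidable (Pre_get_registry_pairs registries) := by unfold Pre_get_registry_pairs; infer_instance

def pvWitness_get_registry_pairs : (List (List (String × String))) :=
  [[("action_name", "attack-dos")], [("action_name", "attack-stop-dos")]]

def Spec_get_registry_pairs (registries : List (List (String × String))) (out : List ((List (String × String)) × (Option (List (String × String))))) : Prop := out = get_registry_pairs_alt registries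
instance (registries : List (List (String × String))) (out : List ((List (String × String)) × (Option (List (String × String))))) : Decidable (Spec_get_registry_pairs registries out) := by unfold Spec_get_registry_pairs; infer_instance

-- ===== CLAIM (what is proved, stated in full; the proofs are below) =====
def Claim_equal_get_registry_pairs : Prop := ∀ (registries : List (List (String × String))), Dom_get_registry_pairs registries → Pre_get_registry_pairs registries → Spec_get_registry_pairs registries (get_registry_pairs registries)

-- ===== LEMMAS AND PROOFS =====

-- the match predicate shared by both normal forms
def pvPred (r s : List (String × String)) : Bool :=
  PySem.Str.isIn (pvLabel (pvName r)) (pvName s)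

-- A's inner scan, when index i can only hold a non-stop registry, is a first-match search
-- for the combined condition over the bare registries.
theorem pvInnerA_eq_find (i : Int) (label : String)
    (l : List (Int × List (String × String)))
    (h : ∀ p ∈ l, p.1 = i → PySem.Str.startswith (pvName p.2) "attack-stop" = false) :
    pvInnerA i label l =
      (l.map (fun p => p.2)).find? (fun r =>
        PySem.Str.isIn label (pvName r) && PySem.Str.startswith (pvName r) "attack-stop") := by
  induction l with
  | nil => rfl
  | cons p rest ih =>
    obtain ⟨j, reg2⟩ := p
    have ih' := ih (fun q hq hqi => h q (List.mem_cons_of_mem _ hq) hqi)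
    simp only [pvInnerA, List.map_cons]
    rw [List.find?_cons]
    by_cases hij : i = j
    · have hst : PySem.Str.startswith (pvName reg2) "attack-stop" = false :=
        h (j, reg2) (List.mem_cons_self ..) (by simpa using hij.symm)
      rw [hst]
      simp only [Bool.and_false]
      exact ih'
    · have h0 : (i != j) = true := by simpa [bne_iff_ne] using hij
      rw [h0]
      simp only [Bool.true_and]
      cases hc : (PySem.Str.isIn label (pvName reg2) &&
          PySem.Str.startswith (pvName reg2) "attack-stop") with
      | true => rfl
      | false => exact ih'

-- A in normal form: map over the non-stop registries, first-match over the stop registries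
theorem A_norm (registries : List (List (String × String))) :
    get_registry_pairs registries =
      (registries.filter (fun r => !PySem.Str.startswith (pvName r) "attack-stop")).map
        (fun r => (r, (registries.filter
            (fun s => PySem.Str.startswith (pvName s) "attack-stop")).find? (pvPred r))) := by
  unfold get_registry_pairs
  simp only []
  have hshape : ∀ (f : Int × List (String × String) → _),
      (fun (pairs : List ((List (String × String)) × Option (List (String × String)))) p =>
        if PySem.Str.startswith (pvName p.2) "attack-stop" then pairs
        else pairs ++ [f p]) =
      (fun pairs p =>
        if (!PySem.Str.startswith (pvName p.2) "attack-stop") then pairs ++ [f p] else pairs) := by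
    intro f; funext pairs p
    cases hs : PySem.Str.startswith (pvName p.2) "attack-stop" <;> simp
  rw [hshape (fun p => (p.2, pvInnerA p.1 (pvLabel (pvName p.2)) (PySem.List.enumerate registries))),
      PySem.List.foldl_append_if]
  simp only [List.nil_append]
  have hsnd : registries.filter (fun r => !PySem.Str.startswith (pvName r) "attack-stop") =
      ((PySem.List.enumerate registries).filter
        (fun p => !PySem.Str.startswith (pvName p.2) "attack-stop")).map (fun p => p.2) := by
    conv_lhs => rw [← PySem.List.map_snd_enumerate registries 0]
    rw [List.filter_map]
    rfl
  rw [hsnd, List.map_map]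
  apply List.map_congr_left
  intro p hp
  have hpmem := List.mem_of_mem_filter hp
  have hpstop : PySem.Str.startswith (pvName p.2) "attack-stop" = false := by
    have := List.of_mem_filter hp
    simpa using this
  simp only [Function.comp]
  refine congrArg (fun t => (p.2, t)) ?_
  rw [pvInnerA_eq_find _ _ _ ?hidx]
  case hidx =>
    intro q hq hqi
    rw [PySem.List.mem_enumerate_iff] at hpmem hq
    obtain ⟨k, hk, rfl⟩ := hpmem
    obtain ⟨k', hk', rfl⟩ := hq
    simp only at hqi
    have : k' = k := by omega
    subst this
    exact hpstop
  rw [PySem.List.map_snd_enumerate, List.find?_filter]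
  have hpred : (fun a => decide (PySem.Str.startswith (pvName a) "attack-stop" = true ∧
        pvPred p.2 a = true)) =
      (fun r => PySem.Str.isIn (pvLabel (pvName p.2)) (pvName r) &&
        PySem.Str.startswith (pvName r) "attack-stop") := by
    funext r
    simp [pvPred, Bool.and_comm]
  rw [hpred]

-- zipping a list with a map of itself is one map of pairs
theorem zip_map_self_pair {α β : Type} (l : List α) (g : α → β) :
    l.zip (l.map g) = l.map (fun a => (a, g a)) := by
  induction l with
  | nil => rfl
  | cons a l ih => simpa using ih

-- zipping a list with a map of itself, then mapping a binary function, is one map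
theorem zip_map_self {α β γ : Type} (l : List α) (g : α → β) (F : α → β → γ) :
    (l.zip (l.map g)).map (fun p => F p.1 p.2) = l.map (fun a => F a (g a)) := by
  induction l with
  | nil => rfl
  | cons a l ih => simpa using ih

-- one first-match-wins update step extends the searched stop list by one element
theorem step_find {α : Type} (S : List α) (s : α) (q : α → Bool) :
    (if (S.find? q).isNone && q s then some s else S.find? q) = (S ++ [s]).find? q := by
  rw [List.find?_append]
  cases h : S.find? q with
  | some v => simp
  | none => cases hq : q s <;> simp [hq]

-- B's fold over the registries, started from per-slot first matches in S, ends in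
-- per-slot first matches over S extended by the stop registries of the suffix.
theorem fold_targets (kept : List (List (String × String)))
    (rs : List (List (String × String))) (S : List (List (String × String))) :
    rs.foldl (fun ts s =>
      if PySem.Str.startswith (pvName s) "attack-stop" then
        (kept.zip ts).map (fun p =>
          if p.2.isNone && PySem.Str.isIn (pvLabel (pvName p.1)) (pvName s) then some s else p.2)
      else ts)
      (kept.map (fun r => S.find? (pvPred r))) =
    kept.map (fun r =>
      (S ++ rs.filter (fun s => PySem.Str.startswith (pvName s) "attack-stop")).find? (pvPred r)) := by
  induction rs generalizing S with
  | nil => simp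
  | cons s rs ih =>
    rw [List.foldl_cons]
    by_cases hs : PySem.Str.startswith (pvName s) "attack-stop" = true
    case neg =>
      rw [if_neg hs, ih S, List.filter_cons, if_neg hs]
    case pos =>
      rw [if_pos hs]
      rw [zip_map_self kept (fun r => S.find? (pvPred r))
        (fun r t => if t.isNone && PySem.Str.isIn (pvLabel (pvName r)) (pvName s) then some s else t)]
      have hupd : (kept.map (fun r =>
          if (S.find? (pvPred r)).isNone && PySem.Str.isIn (pvLabel (pvName r)) (pvName s)
          then some s else S.find? (pvPred r))) =
          kept.map (fun r => (S ++ [s]).find? (pvPred r)) := by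
        apply List.map_congr_left
        intro r _
        exact step_find S s (pvPred r)
      rw [hupd, ih (S ++ [s]), List.filter_cons, if_pos hs]
      simp only [List.append_assoc, List.singleton_append]


-- B in the same normal form
theorem B_norm (registries : List (List (String × String))) :
    get_registry_pairs_alt registries =
      (registries.filter (fun r => !PySem.Str.startswith (pvName r) "attack-stop")).map
        (fun r => (r, (registries.filter
            (fun s => PySem.Str.startswith (pvName s) "attack-stop")).find? (pvPred r))) := by
  unfold get_registry_pairs_alt
  simp only []
  have h0 : (registries.filter (fun r => !PySem.Str.startswith (pvName r) "attack-stop")).map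
      (fun _ => (none : Option (List (String × String)))) =
      (registries.filter (fun r => !PySem.Str.startswith (pvName r) "attack-stop")).map
      (fun r => ([] : List (List (String × String))).find? (pvPred r)) := by
    simp
  rw [h0, fold_targets, List.nil_append]
  exact zip_map_self_pair _ _

theorem get_registry_pairs_spec : Claim_equal_get_registry_pairs := by
  intro registries _ _
  unfold Spec_get_registry_pairs
  rw [A_norm, B_norm]
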